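-- pv_equiv track=rewrite | github.com/shanemoon77/Python-practice-syntax | 03_if/solutions/06_validate_password.py | invastigators
-- ===== SOURCE A (Python) =====
-- import string
--
-- def invastigators(pw):
--     a =  len(pw) >= 8
--     uppers = any(ch.isupper() for ch in pw)
--     lowers = any(ch.islower() for ch in pw)
--     specials = any(ch in string.punctuation for ch in pw)
--     nums = any(ch.isdigit() for ch in pw)
--     bulian_lists = [a, uppers, lowers, specials, nums]
--
--     return bulian_lists
-- ===== SOURCE B (Python) =====
-- import string
--
-- def invastigators(pw):
--     has_upper = has_lower = has_special = has_digit = False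
--     for ch in pw:
--         if ch.isupper():
--             has_upper = True
--         if ch.islower():
--             has_lower = True
--         if ch in string.punctuation:
--             has_special = True
--         if ch.isdigit():
--             has_digit = True
--     return [len(pw) >= 8, has_upper, has_lower, has_special, has_digit]
-- ===== Notes on version B (the rewrite author's own statement) =====
-- stated objective: alternative
-- what changed: Replaces A's five independent full scans (four any() generator passes plus len) with one single loop over the password maintaining four boolean accumulators.
import Mathlib
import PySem

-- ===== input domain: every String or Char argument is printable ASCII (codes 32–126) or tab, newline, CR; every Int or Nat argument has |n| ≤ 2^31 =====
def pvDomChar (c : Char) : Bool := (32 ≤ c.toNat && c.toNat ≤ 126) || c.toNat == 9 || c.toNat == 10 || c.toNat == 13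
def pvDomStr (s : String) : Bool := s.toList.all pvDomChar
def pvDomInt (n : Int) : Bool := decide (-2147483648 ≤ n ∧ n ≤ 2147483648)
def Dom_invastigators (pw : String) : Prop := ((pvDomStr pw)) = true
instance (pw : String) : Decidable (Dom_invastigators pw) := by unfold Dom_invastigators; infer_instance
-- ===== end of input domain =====

-- B replaces A's five independent scans with one single-pass loop carrying four boolean accumulators; same return value.


-- string.punctuation, as a literal list of characters
def pvPunctuation : List Char := "!\"#$%&'()*+,-./:;<=>?@[\\]^_`{|}~".toList

-- ===== PORT A =====
def invastigators (pw : String) : List Bool :=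
  let a := decide (8 ≤ pw.toList.length)
  let uppers := pw.toList.any (fun ch => PySem.Chars.isupper ch)
  let lowers := pw.toList.any (fun ch => PySem.Chars.islower ch)
  let specials := pw.toList.any (fun ch => pvPunctuation.contains ch)
  let nums := pw.toList.any (fun ch => PySem.Chars.isdigit ch)
  [a, uppers, lowers, specials, nums]

-- ===== PORT B =====
def invAltStep (st : Bool × Bool × Bool × Bool) (ch : Char) : Bool × Bool × Bool × Bool :=
  ((if PySem.Chars.isupper ch then true else st.1),
   (if PySem.Chars.islower ch then true else st.2.1),
   (if pvPunctuation.contains ch then true else st.2.2.1),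
   (if PySem.Chars.isdigit ch then true else st.2.2.2))

def invastigators_alt (pw : String) : List Bool :=
  let st := pw.toList.foldl invAltStep (false, false, false, false)
  [decide (8 ≤ pw.toList.length), st.1, st.2.1, st.2.2.1, st.2.2.2]

-- ===== PRECONDITION & SPEC =====
def Spec_invastigators (pw : String) (out : List Bool) : Prop := out = invastigators_alt pw
instance (pw : String) (out : List Bool) : Decidable (Spec_invastigators pw out) := by unfold Spec_invastigators; infer_instance

-- ===== CLAIM (what is proved, stated in full; the proofs are below) =====
def Claim_equal_invastigators : Prop := ∀ (pw : String), Dom_invastigators pw → Spec_invastigators pw (invastigators pw)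

-- ===== LEMMAS AND PROOFS =====
theorem invAlt_foldl (cs : List Char) (u l s d : Bool) :
    cs.foldl invAltStep (u, l, s, d) =
      (u || cs.any (fun ch => PySem.Chars.isupper ch),
       l || cs.any (fun ch => PySem.Chars.islower ch),
       s || cs.any (fun ch => pvPunctuation.contains ch),
       d || cs.any (fun ch => PySem.Chars.isdigit ch)) := by
  induction cs generalizing u l s d with
  | nil => simp
  | cons c cs ih =>
    simp only [List.foldl_cons, List.any_cons, invAltStep, ih]
    split_ifs <;> simp_all

-- ===== VERDICT (by name: the statement is the Claim_ definition above) =====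
theorem invastigators_spec : Claim_equal_invastigators := by
  intro pw _
  unfold Spec_invastigators invastigators invastigators_alt
  simp [invAlt_foldl]
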